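-- pv_equiv track=rewrite | github.com/yyxnlin/esc180 | random/2023 exam/2023_exam_q8.py | remove_every_second_even
-- ===== SOURCE A (Python) =====
-- def remove_every_second_even(L, bool=True):
--     if len(L) == 0:
--         return []
--
--     if L[0] % 2 == 0:
--         bool = not bool
--         if bool:
--             return remove_every_second_even(L[1:], bool)
--     return [L[0]] + remove_every_second_even(L[1:], bool)
-- ===== SOURCE B (Python) =====
-- def remove_every_second_even(L, bool=True):
--     # Stage 1: cumulative count of evens up to and including each position.
--     counts = []
--     c = 0
--     for x in L:
--         if x % 2 == 0:
--             c += 1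
--         counts.append(c)
--     # Stage 2: the k-th even (k = cumulative count) is dropped exactly when
--     # (k % 2 == 0) == bool; odds are always kept.
--     return [x for x, k in zip(L, counts) if x % 2 != 0 or (k % 2 == 0) != bool]
-- ===== Notes on version B (the rewrite author's own statement) =====
-- stated objective: faster
-- what changed: Replaces the toggle-carrying recursion that copies the tail with L[1:] at every step by two staged linear passes: first compute cumulative even-counts, then keep each element by a parity formula on its even-count (no toggle state).
import Mathlib
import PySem

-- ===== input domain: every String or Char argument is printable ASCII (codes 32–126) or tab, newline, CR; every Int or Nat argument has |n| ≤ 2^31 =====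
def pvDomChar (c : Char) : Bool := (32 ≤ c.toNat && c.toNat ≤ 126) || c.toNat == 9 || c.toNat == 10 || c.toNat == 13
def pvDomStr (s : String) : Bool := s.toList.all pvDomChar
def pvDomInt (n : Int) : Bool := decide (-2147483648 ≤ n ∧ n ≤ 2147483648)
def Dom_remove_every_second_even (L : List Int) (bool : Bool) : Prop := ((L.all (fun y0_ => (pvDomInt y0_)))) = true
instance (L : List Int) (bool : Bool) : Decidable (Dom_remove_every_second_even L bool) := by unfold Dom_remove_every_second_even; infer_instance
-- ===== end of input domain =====

-- B replaces A's tail-copying toggle recursion by two staged linear passes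
-- (cumulative even-counts, then a parity-formula filter); objective: faster.


-- ===== PORT A =====
def remove_every_second_even (L : List Int) (bool : Bool) : List Int :=
  match L with
  | [] => []
  | x :: xs =>
    if PySem.Int.mod x 2 == 0 then
      let bool' := !bool
      if bool' then remove_every_second_even xs bool'
      else x :: remove_every_second_even xs bool'
    else x :: remove_every_second_even xs bool

-- ===== PORT B =====
-- stage 1: cumulative count of evens at each position
def pvCounts (L : List Int) (c : Int) : List Int :=
  match L with
  | [] => []
  | x :: xs =>
    let c' := if PySem.Int.mod x 2 == 0 then c + 1 else c
    c' :: pvCounts xs c'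

-- stage 2: the comprehension over zip(L, counts)
def remove_every_second_even_alt (L : List Int) (bool : Bool) : List Int :=
  ((L.zip (pvCounts L 0)).filter
    (fun p => !(PySem.Int.mod p.1 2 == 0) || ((PySem.Int.mod p.2 2 == 0) != bool))).map Prod.fst

-- ===== PRECONDITION & SPEC =====
def Spec_remove_every_second_even (L : List Int) (bool : Bool) (out : List Int) : Prop := out = remove_every_second_even_alt L bool
instance (L : List Int) (bool : Bool) (out : List Int) : Decidable (Spec_remove_every_second_even L bool out) := by unfold Spec_remove_every_second_even; infer_instance

-- ===== CLAIM (what is proved, stated in full; the proofs are below) =====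
def Claim_equal_remove_every_second_even : Prop := ∀ (L : List Int) (bool : Bool), Dom_remove_every_second_even L bool → Spec_remove_every_second_even L bool (remove_every_second_even L bool)

-- ===== LEMMAS AND PROOFS =====
theorem pvModEq (x : Int) : PySem.Int.mod x 2 = x % 2 := by
  simp [PySem.Int.mod, Int.fmod_eq_emod]
theorem pvMod2_flip (c : Int) :
    (PySem.Int.mod (c + 1) 2 == 0) = !(PySem.Int.mod c 2 == 0) := by
  rw [pvModEq, pvModEq]
  rcases Int.emod_two_eq_zero_or_one c with h | h <;>
    · have h2 : (c + 1) % 2 = (c % 2 + 1) % 2 := by omega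
      rw [h2, h]; simp

theorem pvMain (L : List Int) (b0 b : Bool) (c : Int)
    (h : (PySem.Int.mod c 2 == 0) = (b == b0)) :
    remove_every_second_even L b =
      ((L.zip (pvCounts L c)).filter
        (fun p => !(PySem.Int.mod p.1 2 == 0) || ((PySem.Int.mod p.2 2 == 0) != b0))).map Prod.fst := by
  induction L generalizing b c with
  | nil => simp [remove_every_second_even, pvCounts]
  | cons x xs ih =>
    simp only [remove_every_second_even, pvCounts, List.zip_cons_cons, List.filter_cons]
    cases hx : (PySem.Int.mod x 2 == 0) with
    | true =>
      have hflip : (PySem.Int.mod (c + 1) 2 == 0) = !(b == b0) := by rw [pvMod2_flip, h]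
      cases b with
      | true =>
        have hrec : (PySem.Int.mod (c + 1) 2 == 0) = (false == b0) := by
          rw [hflip]; cases b0 <;> rfl
        simp only [Bool.not_true]
        rw [ih false (c + 1) hrec]
        rw [pvModEq] at hrec
        simp
        rw [hrec]; cases b0 <;> simp
      | false =>
        have hrec : (PySem.Int.mod (c + 1) 2 == 0) = (true == b0) := by
          rw [hflip]; cases b0 <;> rfl
        simp only [Bool.not_false]
        rw [ih true (c + 1) hrec]
        rw [pvModEq] at hrec
        simp
        rw [hrec]; cases b0 <;> simp
    | false =>
      rw [ih b c h]
      simp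

-- ===== VERDICT (by name: the statement is the Claim_ definition above) =====
theorem remove_every_second_even_spec : Claim_equal_remove_every_second_even := by
  intro L bool _
  unfold Spec_remove_every_second_even remove_every_second_even_alt
  exact pvMain L bool bool 0 (by cases bool <;> rfl)
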